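-- pv_equiv track=rewrite | github.com/pfaffelh/CRN | generator.py | check_under_crns_for_fast_species
-- ===== SOURCE A (Python) =====
-- from collections import defaultdict
--
-- def all_reactions_contain_fast_species(reactions, fast_species):
--     fast_species_set = set(fast_species)  # Stelle sicher, dass fast_species ein Set ist
--     for reaction in reactions:
--         educts = set(reaction.get("educts", {}).keys())
--         products = set(reaction.get("products", {}).keys())
--
--         # Jetzt verwenden wir den Set-Operator für educts und products
--         if not (educts & fast_species_set) or not (products & fast_species_set):
--             return False
--     return True
--
-- def find_connected_components(reactions):
--     # Erstelle den Graphen als Adjazenzliste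
--     graph = defaultdict(set)
--     reaction_mapping = {}
--
--     for reaction in reactions:
--         educts = frozenset(reaction.get("educts", {}).keys())
--         products = frozenset(reaction.get("products", {}).keys())
--
--         if educts and products:
--             graph[educts].add(products)
--             graph[products].add(educts)
--             reaction_mapping[(educts, products)] = reaction
--
--     # Falls der Graph leer ist, gibt es keine Komponenten
--     if not graph:
--         return []
--
--     # Bestimme die verbundenen Komponenten
--     visited = set()
--     components = []
--
--     for node in graph:
--         if node not in visited:
--             # Tiefensuche (DFS), um alle erreichbaren Knoten zu markieren
--             stack = [node]
--             connected_nodes = set()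
--             connected_reactions = []
--
--             while stack:
--                 current = stack.pop()
--                 if current not in visited:
--                     visited.add(current)
--                     connected_nodes.add(current)
--                     stack.extend(graph[current] - visited)
--
--             # Finde zugehörige Reaktionen
--             for (educts, products), reaction in reaction_mapping.items():
--                 if educts in connected_nodes or products in connected_nodes:
--                     connected_reactions.append(reaction)
--
--             components.append(connected_reactions)
--
--     return components
--
-- def check_under_crns_for_fast_species(reactions, fast_species):
--     # Schritt 1: Finde alle verbundenen Komponenten (Unter-CRNs)
--     components = find_connected_components(reactions)
--
--     # Schritt 2: Überprüfe für jede Unter-CRN, ob alle Reaktionen eine "fast" Spezies enthalten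
--     results = []
--     for idx, component in enumerate(components):
--         # Überprüfe die Unter-CRN (Komponente)
--         if all_reactions_contain_fast_species(component, fast_species):
--             results.append((idx, True))  # Unter-CRN idx enthält fast Spezies in allen Reaktionen
--         else:
--             results.append((idx, False))  # Unter-CRN idx enthält nicht in allen Reaktionen schnelle Spezies
--
--     return results
-- ===== SOURCE B (Python) =====
-- def check_under_crns_for_fast_species(reactions, fast_species):
--     fast = set(fast_species)
--     # eager union: label[n] is the representative of n's component so far;
--     # merging an edge relabels the smaller side's whole class in place
--     label = {}
--     order = []  # nodes in first-insertion order (educts before products, as built)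
--     edges = {}  # deduplicated (educts, products) -> fast flag
--     for r in reactions:
--         E = frozenset(r.get("educts", {}).keys())
--         P = frozenset(r.get("products", {}).keys())
--         if E and P:
--             for n in (E, P):
--                 if n not in label:
--                     label[n] = n
--                     order.append(n)
--             le, lp = label[E], label[P]
--             if le != lp:
--                 for n in label:
--                     if label[n] == lp:
--                         label[n] = le
--             edges.setdefault((E, P), bool(E & fast) and bool(P & fast))
--     # number the classes by first occurrence and mark the bad ones
--     comp_id = {}
--     flags = []
--     for n in order:
--         l = label[n]
--         if l not in comp_id:
--             comp_id[l] = len(flags)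
--             flags.append(True)
--     for (E, P), ok in edges.items():
--         if not ok:
--             flags[comp_id[label[E]]] = False
--     return list(enumerate(flags))
-- ===== Notes on version B (the rewrite author's own statement) =====
-- stated objective: alternative
-- what changed: B drops A's DFS and per-component rescan of the reaction mapping entirely: it maintains a node->representative map by eager union while reading the reactions once, numbers the label classes by first occurrence, and marks bad components in one pass over a deduplicated flagged edge list.
import Mathlib
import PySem

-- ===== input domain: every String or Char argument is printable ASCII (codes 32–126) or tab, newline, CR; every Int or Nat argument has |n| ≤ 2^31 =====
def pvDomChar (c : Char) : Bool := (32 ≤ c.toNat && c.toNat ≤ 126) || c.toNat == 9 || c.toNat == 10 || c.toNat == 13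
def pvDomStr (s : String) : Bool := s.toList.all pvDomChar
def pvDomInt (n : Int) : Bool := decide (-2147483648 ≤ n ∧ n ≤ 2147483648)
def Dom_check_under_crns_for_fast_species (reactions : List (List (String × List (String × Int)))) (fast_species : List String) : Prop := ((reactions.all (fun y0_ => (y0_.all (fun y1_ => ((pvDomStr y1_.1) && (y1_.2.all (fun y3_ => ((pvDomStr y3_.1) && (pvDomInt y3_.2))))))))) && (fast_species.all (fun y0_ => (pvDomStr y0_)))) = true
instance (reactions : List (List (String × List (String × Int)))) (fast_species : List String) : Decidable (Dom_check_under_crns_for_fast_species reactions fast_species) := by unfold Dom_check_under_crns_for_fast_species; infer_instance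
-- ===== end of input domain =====

-- B replaces A's DFS + per-component rescan of the reaction mapping by eager-union
-- labelling of the nodes and one pass over a deduplicated flagged edge list
-- (objective: alternative).

-- ===== PORT A =====
-- frozenset(d.keys()) of a dict, represented canonically as the sorted list of its distinct keys
def pvFrozen (d : List (String × Int)) : List String :=
  PySem.List.sorted (PySem.Dict.keys (PySem.Dict.ofList d)) (fun s => s) false

-- reaction.get(k, {})
def pvSide (r : List (String × List (String × Int))) (k : String) : List (String × Int) :=
  (PySem.Dict.ofList r).getD k []

-- the loop of all_reactions_contain_fast_species (early return False)
def pvA_allFastGo (fastSet : PySem.Set String) :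
    List (List (String × List (String × Int))) → Bool
  | [] => true
  | r :: rest =>
    let educts := PySem.Set.ofList (PySem.Dict.keys (PySem.Dict.ofList (pvSide r "educts")))
    let products := PySem.Set.ofList (PySem.Dict.keys (PySem.Dict.ofList (pvSide r "products")))
    if PySem.Set.inter educts fastSet = [] ∨ PySem.Set.inter products fastSet = [] then false
    else pvA_allFastGo fastSet rest

def pvA_allFast (reactions : List (List (String × List (String × Int)))) (fast_species : List String) : Bool :=
  pvA_allFastGo (PySem.Set.ofList fast_species) reactions

-- body of the first loop of find_connected_components: graph (defaultdict(set)) and reaction_mapping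
def pvA_buildStep
    (gm : PySem.Dict (List String) (PySem.Set (List String)) ×
          PySem.Dict (List String × List String) (List (String × List (String × Int))))
    (r : List (String × List (String × Int))) :
    PySem.Dict (List String) (PySem.Set (List String)) ×
    PySem.Dict (List String × List String) (List (String × List (String × Int))) :=
  let E := pvFrozen (pvSide r "educts")
  let P := pvFrozen (pvSide r "products")
  if E ≠ [] ∧ P ≠ [] then
    let g1 := gm.1.insert E (PySem.Set.add (gm.1.getD E []) P)
    let g2 := g1.insert P (PySem.Set.add (g1.getD P []) E)
    (g2, gm.2.insert (E, P) r)
  else gm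

def pvA_build (reactions : List (List (String × List (String × Int)))) :
    PySem.Dict (List String) (PySem.Set (List String)) ×
    PySem.Dict (List String × List String) (List (String × List (String × Int))) :=
  reactions.foldl pvA_buildStep (PySem.Dict.empty, PySem.Dict.empty)

-- termination measure of the DFS while-loop: number of unvisited graph keys
def pvUnvis (g : PySem.Dict (List String) (PySem.Set (List String))) (visited : List (List String)) : Nat :=
  (g.keys.filter (fun k => !PySem.Set.contains visited k)).length

theorem pvContains_append (v : List (List String)) (c k : List String) :
    PySem.Set.contains (v ++ [c]) k = (PySem.Set.contains v k || k == c) := by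
  show (v ++ [c]).contains k = _
  rw [List.contains_append]
  simp only [PySem.Set.contains]
  congr 1
  rw [List.contains_cons]
  simp

theorem pvFilterLenLt {α : Type} (p : α → Bool) (x : α) :
    ∀ l : List α, x ∈ l → p x = false → (l.filter p).length < l.length := by
  intro l hm hp
  induction l with
  | nil => cases hm
  | cons a t ih =>
    rcases List.mem_cons.1 hm with rfl | hm'
    · simp only [List.filter_cons, hp]
      exact Nat.lt_succ_of_le (List.length_filter_le _ _)
    · by_cases ha : p a = true
      · simp only [List.filter_cons, ha]
        exact Nat.succ_lt_succ (ih hm')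
      · have ha' : p a = false := Bool.not_eq_true _ ▸ (by simpa using ha)
        simp only [List.filter_cons, ha']
        exact Nat.lt_trans (ih hm') (Nat.lt_succ_self _)

theorem pvUnvis_append_lt (g : PySem.Dict (List String) (PySem.Set (List String)))
    (visited : List (List String)) (c : List String)
    (h1 : c ∈ g.keys) (h2 : PySem.Set.contains visited c = false) :
    pvUnvis g (visited ++ [c]) < pvUnvis g visited := by
  unfold pvUnvis
  have hp : g.keys.filter (fun k => !PySem.Set.contains (visited ++ [c]) k)
      = (g.keys.filter (fun k => !PySem.Set.contains visited k)).filter (fun k => !(k == c)) := by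
    rw [List.filter_filter]
    apply List.filter_congr
    intro k _
    rw [pvContains_append]
    cases PySem.Set.contains visited k <;> simp
  rw [hp]
  have hcv : c ∉ visited := fun hm => by
    rw [(PySem.Set.contains_iff visited c).2 hm] at h2; cases h2
  exact pvFilterLenLt _ c _ (List.mem_filter.2 ⟨h1, by simp [PySem.Set.contains, hcv]⟩) (by simp)

theorem pvUnvis_append_eq (g : PySem.Dict (List String) (PySem.Set (List String)))
    (visited : List (List String)) (c : List String) (h1 : c ∉ g.keys) :
    pvUnvis g (visited ++ [c]) = pvUnvis g visited := by
  unfold pvUnvis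
  congr 1
  apply List.filter_congr
  intro k hk
  rw [pvContains_append]
  have hkc : (k == c) = false := beq_false_of_ne (fun h => h1 (h ▸ hk))
  simp [hkc]

-- the DFS while-loop of A (stack top = head; Python's iteration order over the popped
-- set difference is unspecified and the function's result does not depend on it)
def pvA_dfs (g : PySem.Dict (List String) (PySem.Set (List String))) :
    List (List String) → PySem.Set (List String) → PySem.Set (List String) →
    PySem.Set (List String) × PySem.Set (List String)
  | [], visited, conn => (visited, conn)
  | current :: stack, visited, conn =>
    if hv : PySem.Set.contains visited current then
      pvA_dfs g stack visited conn
    else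
      let visited' := PySem.Set.add visited current
      let conn' := PySem.Set.add conn current
      pvA_dfs g (PySem.Set.diff (g.getD current []) visited' ++ stack) visited' conn'
termination_by stack visited _ => (pvUnvis g visited, stack.length)
decreasing_by
  · exact Prod.Lex.right _ (Nat.lt_succ_self _)
  · have hcv : current ∉ visited := fun hm => hv ((PySem.Set.contains_iff visited current).2 hm)
    have hadd : PySem.Set.add visited current = visited ++ [current] := PySem.Set.add_of_not_mem hcv
    by_cases hk : current ∈ g.keys
    · exact Prod.Lex.left _ _ (by
        rw [hadd]
        exact pvUnvis_append_lt g visited current hk (Bool.eq_false_iff.2 hv))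
    · have hg : g.getD current [] = [] := PySem.Dict.getD_of_not_contains g []
        (by rw [PySem.Dict.contains_eq_decide_mem_keys]; simp [hk])
      have he : pvUnvis g (PySem.Set.add visited current) = pvUnvis g visited := by
        rw [hadd]; exact pvUnvis_append_eq g visited current hk
      have hd : PySem.Set.diff (g.getD current []) (PySem.Set.add visited current) ++ stack = stack := by
        rw [hg]; rfl
      rw [hd, he]
      exact Prod.Lex.right _ (Nat.lt_succ_self _)

-- body of the components loop (one unvisited start node: DFS, then the scan of reaction_mapping)
def pvA_compStep (graph : PySem.Dict (List String) (PySem.Set (List String)))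
    (mapping : PySem.Dict (List String × List String) (List (String × List (String × Int))))
    (vc : PySem.Set (List String) × List (List (List (String × List (String × Int)))))
    (node : List String) :
    PySem.Set (List String) × List (List (List (String × List (String × Int)))) :=
  if PySem.Set.contains vc.1 node then vc
  else
    let dc := pvA_dfs graph [node] vc.1 PySem.Set.empty
    let connected_reactions := (mapping.items.filter
        (fun it => PySem.Set.contains dc.2 it.1.1 || PySem.Set.contains dc.2 it.1.2)).map (·.2)
    (dc.1, vc.2 ++ [connected_reactions])

def check_under_crns_for_fast_species (reactions : List (List (String × List (String × Int)))) (fast_species : List String) : List (Int × Bool) :=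
  let gm := pvA_build reactions
  let graph := gm.1
  let mapping := gm.2
  if graph.items = [] then []
  else
    let vc := graph.keys.foldl (pvA_compStep graph mapping) (PySem.Set.empty, [])
    (PySem.List.enumerate vc.2 0).map (fun ic => (ic.1, pvA_allFast ic.2 fast_species))

-- ===== PORT B =====
-- bool(E & fast) and bool(P & fast)
def pvFastPair (fast : PySem.Set String) (E P : List String) : Bool :=
  !(PySem.Set.inter E fast == []) && !(PySem.Set.inter P fast == [])

-- 'if n not in label: label[n] = n; order.append(n)'
def pvB_addNode (st : PySem.Dict (List String) (List String) × List (List String))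
    (n : List String) :
    PySem.Dict (List String) (List String) × List (List String) :=
  if st.1.contains n then st else (st.1.insert n n, st.2 ++ [n])

-- 'for n in label: if label[n] == lp: label[n] = le'  (in-place value rewrite keeps key order)
def pvRelabel (label : PySem.Dict (List String) (List String)) (le lp : List String) :
    PySem.Dict (List String) (List String) :=
  PySem.Dict.mk (label.items.map (fun p => (p.1, if p.2 == lp then le else p.2)))

-- body of B's single build loop over the reactions
def pvB_buildStep (fast : PySem.Set String)
    (st : PySem.Dict (List String) (List String) × List (List String) ×
          PySem.Dict (List String × List String) Bool)
    (r : List (String × List (String × Int))) :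
    PySem.Dict (List String) (List String) × List (List String) ×
    PySem.Dict (List String × List String) Bool :=
  let E := pvFrozen (pvSide r "educts")
  let P := pvFrozen (pvSide r "products")
  if E ≠ [] ∧ P ≠ [] then
    let lo := pvB_addNode (pvB_addNode (st.1, st.2.1) E) P
    let le := lo.1.getD E []
    let lp := lo.1.getD P []
    let label' := if le ≠ lp then pvRelabel lo.1 le lp else lo.1
    (label', lo.2, st.2.2.setdefault (E, P) (pvFastPair fast E P))
  else st

-- body of B's class-numbering loop over order ('label[n]' total here: every order node is a label key)
def pvB_idStep (label : PySem.Dict (List String) (List String))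
    (st : PySem.Dict (List String) Int × List Bool) (n : List String) :
    PySem.Dict (List String) Int × List Bool :=
  let l := label.getD n []
  if st.1.contains l then st else (st.1.insert l (st.2.length : Int), st.2 ++ [true])

-- body of B's bad-marking loop over the edge items ('flags[i] = False': the index is
-- provably in range, so the total pySetD form is exact here)
def pvB_markStep (label : PySem.Dict (List String) (List String))
    (comp_id : PySem.Dict (List String) Int)
    (flags : List Bool) (e : (List String × List String) × Bool) : List Bool :=
  if e.2 then flags
  else PySem.List.pySetD flags (comp_id.getD (label.getD e.1.1 []) 0) false

def check_under_crns_for_fast_species_alt (reactions : List (List (String × List (String × Int)))) (fast_species : List String) : List (Int × Bool) :=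
  let fast := PySem.Set.ofList fast_species
  let st := reactions.foldl (pvB_buildStep fast) (PySem.Dict.empty, [], PySem.Dict.empty)
  let label := st.1
  let order := st.2.1
  let edges := st.2.2
  let idst := order.foldl (pvB_idStep label) (PySem.Dict.empty, [])
  let flags := edges.items.foldl (pvB_markStep label idst.1) idst.2
  PySem.List.enumerate flags 0

-- ===== PRECONDITION & SPEC =====
def Spec_check_under_crns_for_fast_species (reactions : List (List (String × List (String × Int)))) (fast_species : List String) (out : List (Int × Bool)) : Prop := out = check_under_crns_for_fast_species_alt reactions fast_species
instance (reactions : List (List (String × List (String × Int)))) (fast_species : List String) (out : List (Int × Bool)) : Decidable (Spec_check_under_crns_for_fast_species reactions fast_species out) := by unfold Spec_check_under_crns_for_fast_species; infer_instance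

-- ===== CLAIM (what is proved, stated in full; the proofs are below) =====
def Claim_equal_check_under_crns_for_fast_species : Prop := ∀ (reactions : List (List (String × List (String × Int)))) (fast_species : List String), Dom_check_under_crns_for_fast_species reactions fast_species → Spec_check_under_crns_for_fast_species reactions fast_species (check_under_crns_for_fast_species reactions fast_species)

-- ===== LEMMAS AND PROOFS =====


-- reachability along the adjacency dict
inductive pvReach (g : PySem.Dict (List String) (PySem.Set (List String))) :
    List String → List String → Prop
  | refl (a : List String) : pvReach g a a
  | step {a b c : List String} : pvReach g a b → c ∈ g.getD b [] → pvReach g a c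

theorem pvReach_trans {g : PySem.Dict (List String) (PySem.Set (List String))}
    {a b c : List String} (h1 : pvReach g a b) (h2 : pvReach g b c) : pvReach g a c := by
  induction h2 with
  | refl => exact h1
  | step _ hadj ih => exact pvReach.step ih hadj

theorem pvReach_symm {g : PySem.Dict (List String) (PySem.Set (List String))}
    (hsym : ∀ x z, z ∈ g.getD x [] → x ∈ g.getD z []) {a b : List String}
    (h : pvReach g a b) : pvReach g b a := by
  induction h with
  | refl => exact pvReach.refl _
  | step _ hadj ih =>
    exact pvReach_trans (pvReach.step (pvReach.refl _) (hsym _ _ hadj)) ih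

theorem pvReach_mono {g g' : PySem.Dict (List String) (PySem.Set (List String))}
    (hmono : ∀ x z, z ∈ g.getD x [] → z ∈ g'.getD x []) {a b : List String}
    (h : pvReach g a b) : pvReach g' a b := by
  induction h with
  | refl => exact pvReach.refl _
  | step _ hadj ih => exact pvReach.step ih (hmono _ _ hadj)

-- adjacency/key/label bookkeeping for one build step
theorem pvG2_mem (g : PySem.Dict (List String) (PySem.Set (List String))) (E P : List String)
    (x z : List String) :
    z ∈ ((g.insert E (PySem.Set.add (g.getD E []) P)).insert P
        (PySem.Set.add ((g.insert E (PySem.Set.add (g.getD E []) P)).getD P []) E)).getD x []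
      ↔ z ∈ g.getD x [] ∨ (x = E ∧ z = P) ∨ (x = P ∧ z = E) := by
  rw [PySem.Dict.getD_insert, PySem.Dict.getD_insert, PySem.Dict.getD_insert]
  by_cases hxP : x = P <;> by_cases hxE : x = E <;> by_cases hPE : P = E <;>
    simp [hxP, hxE, hPE, PySem.Set.mem_add] <;> subst_vars <;> try tauto
  all_goals simp_all <;> tauto

theorem pvRelabelX_keys (label : PySem.Dict (List String) (List String)) (le lp : List String) :
    (pvRelabel label le lp).keys = label.keys := by
  show (PySem.Dict.mk (label.items.map (fun p => (p.1, if p.2 == lp then le else p.2)))).keys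
      = label.keys
  show ((label.items.map (fun p => (p.1, if p.2 == lp then le else p.2))).map (·.1))
      = label.items.map (·.1)
  rw [List.map_map]
  exact List.map_congr_left (fun p _ => rfl)

theorem pvRelabelX_getD (label : PySem.Dict (List String) (List String)) (le lp : List String)
    (hnd : label.keys.Nodup) (x : List String) (hx : x ∈ label.keys) :
    (pvRelabel label le lp).getD x []
      = (if label.getD x [] = lp then le else label.getD x []) := by
  show (PySem.Dict.mk (label.items.map (fun p => (p.1, if p.2 == lp then le else p.2)))).getD x []
      = (if label.getD x [] = lp then le else label.getD x [])
  obtain ⟨p, hp, hpx⟩ := List.mem_map.1 hx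
  have hv : label.getD x [] = p.2 := by
    rw [← hpx] at *
    exact PySem.Dict.getD_of_mem_items label (by simpa using hp) hnd []
  have hmem : (x, if p.2 == lp then le else p.2)
      ∈ (label.items.map (fun p => (p.1, if p.2 == lp then le else p.2))) :=
    List.mem_map.2 ⟨p, hp, by rw [← hpx]⟩
  have hknd : (PySem.Dict.mk (label.items.map (fun p => (p.1, if p.2 == lp then le else p.2)))).keys.Nodup := by
    have := pvRelabelX_keys label le lp
    unfold pvRelabel at this
    rw [this]
    exact hnd
  rw [PySem.Dict.getD_of_mem_items _ hmem hknd []]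
  rw [hv]
  by_cases h : p.2 = lp <;> simp [h]

theorem pvAdd2_facts (g : PySem.Dict (List String) (PySem.Set (List String)))
    (label : PySem.Dict (List String) (List String))
    (order : List (List String)) (E P : List String)
    (hko : label.keys = order) (horder : order = g.keys)
    (h9 : ∀ n ∈ order, label.getD n [] ∈ order) :
    (pvB_addNode (pvB_addNode (label, order) E) P).1.keys
        = (pvB_addNode (pvB_addNode (label, order) E) P).2 ∧
    (∀ vE vP : PySem.Set (List String),
      (pvB_addNode (pvB_addNode (label, order) E) P).2 = ((g.insert E vE).insert P vP).keys) ∧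
    (∀ n ∈ order, (pvB_addNode (pvB_addNode (label, order) E) P).1.getD n [] = label.getD n []) ∧
    (∀ n ∈ (pvB_addNode (pvB_addNode (label, order) E) P).2, n ∉ order →
      (pvB_addNode (pvB_addNode (label, order) E) P).1.getD n [] = n) ∧
    (∀ x y, x ∈ (pvB_addNode (pvB_addNode (label, order) E) P).2 →
      y ∈ (pvB_addNode (pvB_addNode (label, order) E) P).2 →
      (pvB_addNode (pvB_addNode (label, order) E) P).1.getD x []
        = (pvB_addNode (pvB_addNode (label, order) E) P).1.getD y [] →
      (x = y ∨ (x ∈ order ∧ y ∈ order))) := by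
  have hc1 : (label.contains E) = decide (E ∈ order) := by
    rw [PySem.Dict.contains_eq_decide_mem_keys, hko]
  have hgc1 : ∀ vE : PySem.Set (List String), (g.contains E) = decide (E ∈ order) := by
    intro _; rw [PySem.Dict.contains_eq_decide_mem_keys, horder]
  by_cases hE : E ∈ order
  · have hst1 : pvB_addNode (label, order) E = (label, order) := by
      simp [pvB_addNode, hc1, hE]
    have hgk1 : ∀ vE : PySem.Set (List String), (g.insert E vE).keys = g.keys := by
      intro vE
      exact PySem.Dict.keys_insert_of_contains g vE (by rw [hgc1 vE]; simpa using hE)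
    rw [hst1]
    have hc2 : (label.contains P) = decide (P ∈ order) := by
      rw [PySem.Dict.contains_eq_decide_mem_keys, hko]
    by_cases hP : P ∈ order
    · have hst2 : pvB_addNode (label, order) P = (label, order) := by
        simp [pvB_addNode, hc2, hP]
      rw [hst2]
      refine ⟨hko, ?_, fun n _ => rfl, fun n hn hno => absurd hn hno, ?_⟩
      · intro vE vP
        rw [PySem.Dict.keys_insert_of_contains _ vP (by
            rw [PySem.Dict.contains_eq_decide_mem_keys, hgk1 vE, ← horder]; simpa using hP),
          hgk1 vE, horder]
      · intro x y hx hy _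
        exact Or.inr ⟨hx, hy⟩
    · have hst2 : pvB_addNode (label, order) P = (label.insert P P, order ++ [P]) := by
        simp [pvB_addNode, hc2, hP]
      rw [hst2]
      have hgd : ∀ n, (label.insert P P).getD n [] = if n = P then P else label.getD n [] :=
        fun n => PySem.Dict.getD_insert label P n P []
      refine ⟨?_, ?_, ?_, ?_, ?_⟩
      · rw [PySem.Dict.keys_insert_of_not_contains label P (by simp [hc2, hP]), hko]
      · intro vE vP
        rw [PySem.Dict.keys_insert_of_not_contains _ vP (by
            rw [PySem.Dict.contains_eq_decide_mem_keys, hgk1 vE, ← horder]; simpa using hP),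
          hgk1 vE, horder]
      · intro n hn
        rw [hgd n, if_neg (fun h : n = P => hP (h ▸ hn))]
      · intro n hn hno
        rcases List.mem_append.1 hn with h | h
        · exact absurd h hno
        · have hp : n = P := by simpa using h
          subst hp
          rw [hgd n, if_pos rfl]
      · intro x y hx hy hxy
        rw [hgd x, hgd y] at hxy
        by_cases hxp : x = P <;> by_cases hyp : y = P
        · exact Or.inl (hxp.trans hyp.symm)
        · rw [if_pos hxp, if_neg hyp] at hxy
          have hy' : y ∈ order := by
            rcases List.mem_append.1 hy with h | h
            · exact h
            · exact absurd (by simpa using h) hyp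
          exact absurd (hxy ▸ h9 y hy') hP
        · rw [if_neg hxp, if_pos hyp] at hxy
          have hx' : x ∈ order := by
            rcases List.mem_append.1 hx with h | h
            · exact h
            · exact absurd (by simpa using h) hxp
          exact absurd (hxy.symm ▸ h9 x hx') hP
        · have hx' : x ∈ order := by
            rcases List.mem_append.1 hx with h | h
            · exact h
            · exact absurd (by simpa using h) hxp
          have hy' : y ∈ order := by
            rcases List.mem_append.1 hy with h | h
            · exact h
            · exact absurd (by simpa using h) hyp
          exact Or.inr ⟨hx', hy'⟩
  · have hst1 : pvB_addNode (label, order) E = (label.insert E E, order ++ [E]) := by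
      simp [pvB_addNode, hc1, hE]
    have hgk1 : ∀ vE : PySem.Set (List String), (g.insert E vE).keys = order ++ [E] := by
      intro vE
      rw [PySem.Dict.keys_insert_of_not_contains g vE (by rw [hgc1 vE]; simpa using hE), horder]
    rw [hst1]
    have hko1 : (label.insert E E).keys = order ++ [E] := by
      rw [PySem.Dict.keys_insert_of_not_contains label E (by simp [hc1, hE]), hko]
    have hgd1 : ∀ n, (label.insert E E).getD n [] = if n = E then E else label.getD n [] :=
      fun n => PySem.Dict.getD_insert label E n E []
    have hc2 : ((label.insert E E).contains P) = decide (P ∈ order ++ [E]) := by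
      rw [PySem.Dict.contains_eq_decide_mem_keys, hko1]
    by_cases hP : P ∈ order ++ [E]
    · have hst2 : pvB_addNode (label.insert E E, order ++ [E]) P = (label.insert E E, order ++ [E]) := by
        simp only [pvB_addNode, hc2]
        rw [if_pos (by simpa using hP)]
      rw [hst2]
      refine ⟨hko1, ?_, ?_, ?_, ?_⟩
      · intro vE vP
        rw [PySem.Dict.keys_insert_of_contains _ vP (by
            rw [PySem.Dict.contains_eq_decide_mem_keys, hgk1 vE]; simpa using hP),
          hgk1 vE]
      · intro n hn
        rw [hgd1 n, if_neg (fun h : n = E => hE (h ▸ hn))]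
      · intro n hn hno
        rcases List.mem_append.1 hn with h | h
        · exact absurd h hno
        · have he : n = E := by simpa using h
          subst he
          rw [hgd1 n, if_pos rfl]
      · intro x y hx hy hxy
        rw [hgd1 x, hgd1 y] at hxy
        by_cases hxe : x = E <;> by_cases hye : y = E
        · exact Or.inl (hxe.trans hye.symm)
        · rw [if_pos hxe, if_neg hye] at hxy
          have hy' : y ∈ order := by
            rcases List.mem_append.1 hy with h | h
            · exact h
            · exact absurd (by simpa using h) hye
          exact absurd (hxy ▸ h9 y hy') hE
        · rw [if_neg hxe, if_pos hye] at hxy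
          have hx' : x ∈ order := by
            rcases List.mem_append.1 hx with h | h
            · exact h
            · exact absurd (by simpa using h) hxe
          exact absurd (hxy.symm ▸ h9 x hx') hE
        · have hx' : x ∈ order := by
            rcases List.mem_append.1 hx with h | h
            · exact h
            · exact absurd (by simpa using h) hxe
          have hy' : y ∈ order := by
            rcases List.mem_append.1 hy with h | h
            · exact h
            · exact absurd (by simpa using h) hye
          exact Or.inr ⟨hx', hy'⟩
    · have hPE : P ≠ E := fun h => hP (by simp [h])
      have hPo : P ∉ order := fun h => hP (by simp [h])
      have hst2 : pvB_addNode (label.insert E E, order ++ [E]) P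
          = ((label.insert E E).insert P P, (order ++ [E]) ++ [P]) := by
        simp only [pvB_addNode, hc2]
        rw [if_neg (by simpa using hP)]
      rw [hst2]
      have hgd2 : ∀ n, ((label.insert E E).insert P P).getD n []
          = if n = P then P else if n = E then E else label.getD n [] := by
        intro n
        rw [PySem.Dict.getD_insert, hgd1]
      refine ⟨?_, ?_, ?_, ?_, ?_⟩
      · rw [PySem.Dict.keys_insert_of_not_contains _ P (by
          rw [PySem.Dict.contains_eq_decide_mem_keys, hko1]; simpa using hP), hko1]
      · intro vE vP
        rw [PySem.Dict.keys_insert_of_not_contains _ vP (by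
            rw [PySem.Dict.contains_eq_decide_mem_keys, hgk1 vE]; simpa using hP),
          hgk1 vE]
      · intro n hn
        rw [hgd2 n, if_neg (fun h : n = P => hPo (h ▸ hn)), if_neg (fun h : n = E => hE (h ▸ hn))]
      · intro n hn hno
        rcases List.mem_append.1 hn with h | h
        · rcases List.mem_append.1 h with h' | h'
          · exact absurd h' hno
          · have he : n = E := by simpa using h'
            subst he
            rw [hgd2 n, if_neg (fun h : n = P => hPE h.symm), if_pos rfl]
        · have hp : n = P := by simpa using h
          subst hp
          rw [hgd2 n, if_pos rfl]
      · intro x y hx hy hxy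
        rw [hgd2 x, hgd2 y] at hxy
        have hcase : ∀ n, n ∈ (order ++ [E]) ++ [P] → n = P ∨ n = E ∨ n ∈ order := by
          intro n hn
          rcases List.mem_append.1 hn with h | h
          · rcases List.mem_append.1 h with h' | h'
            · exact Or.inr (Or.inr h')
            · exact Or.inr (Or.inl (by simpa using h'))
          · exact Or.inl (by simpa using h)
        rcases hcase x hx with hxc | hxc | hxc <;> rcases hcase y hy with hyc | hyc | hyc
        · exact Or.inl (hxc.trans hyc.symm)
        · rw [if_pos hxc, if_neg (show ¬ y = P from fun h => hPE (hyc ▸ h : (E:List String) = P).symm), if_pos hyc] at hxy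
          exact absurd hxy.symm hPE.symm
        · rw [if_pos hxc, if_neg (show ¬ y = P from fun h => hPo (h ▸ hyc)),
            if_neg (show ¬ y = E from fun h => hE (h ▸ hyc))] at hxy
          exact absurd (hxy ▸ h9 y hyc) hPo
        · rw [if_neg (show ¬ x = P from fun h => hPE (hxc ▸ h : (E:List String) = P).symm), if_pos hxc, if_pos hyc] at hxy
          exact absurd hxy hPE.symm
        · exact Or.inl (hxc.trans hyc.symm)
        · rw [if_neg (show ¬ x = P from fun h => hPE (hxc ▸ h : (E:List String) = P).symm), if_pos hxc,
            if_neg (show ¬ y = P from fun h => hPo (h ▸ hyc)),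
            if_neg (show ¬ y = E from fun h => hE (h ▸ hyc))] at hxy
          exact absurd (hxy ▸ h9 y hyc) hE
        · rw [if_neg (show ¬ x = P from fun h => hPo (h ▸ hxc)),
            if_neg (show ¬ x = E from fun h => hE (h ▸ hxc)), if_pos hyc] at hxy
          exact absurd (hxy.symm ▸ h9 x hxc) hPo
        · rw [if_neg (show ¬ x = P from fun h => hPo (h ▸ hxc)),
            if_neg (show ¬ x = E from fun h => hE (h ▸ hxc)),
            if_neg (show ¬ y = P from fun h => hPE (hyc ▸ h : (E:List String) = P).symm), if_pos hyc] at hxy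
          exact absurd (hxy.symm ▸ h9 x hxc) hE
        · exact Or.inr ⟨hxc, hyc⟩

-- invariants of A's graph/mapping build
def pvGInv (g : PySem.Dict (List String) (PySem.Set (List String)))
    (m : PySem.Dict (List String × List String) (List (String × List (String × Int)))) : Prop :=
  g.keys.Nodup ∧ m.keys.Nodup ∧
  (∀ it ∈ m.items, it.1.1 = pvFrozen (pvSide it.2 "educts") ∧ it.1.2 = pvFrozen (pvSide it.2 "products")) ∧
  (∀ k ∈ m.keys, k.1 ∈ g.keys ∧ k.2 ∈ g.keys) ∧
  (∀ x z, z ∈ g.getD x [] ↔ ((x, z) ∈ m.keys ∨ (z, x) ∈ m.keys))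

-- invariants tying B's build state to A's
def pvLInv (g : PySem.Dict (List String) (PySem.Set (List String)))
    (m : PySem.Dict (List String × List String) (List (String × List (String × Int))))
    (label : PySem.Dict (List String) (List String)) (order : List (List String))
    (edges : PySem.Dict (List String × List String) Bool) (fast : PySem.Set String) : Prop :=
  order = g.keys ∧ label.keys = order ∧
  (∀ n ∈ order, label.getD n [] ∈ order) ∧
  (∀ k ∈ m.keys, label.getD k.1 [] = label.getD k.2 []) ∧
  (∀ x y, x ∈ order → y ∈ order → label.getD x [] = label.getD y [] → pvReach g x y) ∧
  edges.items = m.items.map (fun it => (it.1, pvFastPair fast it.1.1 it.1.2))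

theorem pvBuild_inv (fast : PySem.Set String) :
    ∀ (rs : List (List (String × List (String × Int))))
      (g : PySem.Dict (List String) (PySem.Set (List String)))
      (m : PySem.Dict (List String × List String) (List (String × List (String × Int))))
      (label : PySem.Dict (List String) (List String)) (order : List (List String))
      (edges : PySem.Dict (List String × List String) Bool),
      pvGInv g m → pvLInv g m label order edges fast →
      pvGInv (rs.foldl pvA_buildStep (g, m)).1 (rs.foldl pvA_buildStep (g, m)).2 ∧
      pvLInv (rs.foldl pvA_buildStep (g, m)).1 (rs.foldl pvA_buildStep (g, m)).2
        (rs.foldl (pvB_buildStep fast) (label, order, edges)).1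
        (rs.foldl (pvB_buildStep fast) (label, order, edges)).2.1
        (rs.foldl (pvB_buildStep fast) (label, order, edges)).2.2 fast := by
  intro rs
  induction rs with
  | nil => intro g m label order edges hG hL; exact ⟨hG, hL⟩
  | cons r rs ih =>
    intro g m label order edges hG hL
    obtain ⟨hg1, hg2, hg3, hg4, hg5⟩ := hG
    obtain ⟨hl1, hl2, hl3, hl4, hl5, hl6⟩ := hL
    rw [List.foldl_cons, List.foldl_cons]
    by_cases hEP : pvFrozen (pvSide r "educts") ≠ [] ∧ pvFrozen (pvSide r "products") ≠ []
    · set E := pvFrozen (pvSide r "educts") with hE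
      set P := pvFrozen (pvSide r "products") with hP
      -- the two step results
      set g2 := (g.insert E (PySem.Set.add (g.getD E []) P)).insert P
        (PySem.Set.add ((g.insert E (PySem.Set.add (g.getD E []) P)).getD P []) E) with hg2def
      have hAstep : pvA_buildStep (g, m) r = (g2, m.insert (E, P) r) := by
        simp only [pvA_buildStep, ← hE, ← hP, if_pos hEP, hg2def]
      obtain ⟨a1, a2, a3, a4, a5⟩ := pvAdd2_facts g label order E P hl2 hl1 hl3
      set label2 := (pvB_addNode (pvB_addNode (label, order) E) P).1 with hlabel2
      set order2 := (pvB_addNode (pvB_addNode (label, order) E) P).2 with horder2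
      set le := label2.getD E [] with hle
      set lp := label2.getD P [] with hlp
      set label' := if le ≠ lp then pvRelabel label2 le lp else label2 with hlabel'
      have hBstep : pvB_buildStep fast (label, order, edges) r
          = (label', order2, edges.setdefault (E, P) (pvFastPair fast E P)) := by
        simp only [pvB_buildStep, ← hE, ← hP, if_pos hEP]
        rfl
      rw [hAstep, hBstep]
      -- shared facts
      have hord2keys : order2 = g2.keys := by rw [hg2def]; exact a2 _ _
      have hg2nd : g2.keys.Nodup := by
        rw [hg2def]
        exact PySem.Dict.nodup_keys_insert _ _ _ (PySem.Dict.nodup_keys_insert _ _ _ hg1)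
      have hnd2 : label2.keys.Nodup := by rw [a1, hord2keys]; exact hg2nd
      have hsub : ∀ x ∈ order, x ∈ order2 := by
        intro x hx
        rw [hord2keys, hg2def]
        exact (PySem.Dict.mem_keys_insert _ _ _ _).2 (Or.inr
          ((PySem.Dict.mem_keys_insert _ _ _ _).2 (Or.inr (hl1 ▸ hx))))
      have hEin : E ∈ order2 := by
        rw [hord2keys, hg2def]
        exact (PySem.Dict.mem_keys_insert _ _ _ _).2 (Or.inr
          ((PySem.Dict.mem_keys_insert _ _ _ _).2 (Or.inl rfl)))
      have hPin : P ∈ order2 := by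
        rw [hord2keys, hg2def]
        exact (PySem.Dict.mem_keys_insert _ _ _ _).2 (Or.inl rfl)
      have hval2 : ∀ n ∈ order2, label2.getD n [] ∈ order2 := by
        intro n hn
        by_cases hno : n ∈ order
        · rw [a3 n hno]; exact hsub _ (hl3 n hno)
        · rw [a4 n hn hno]; exact hn
      have hadj2 : ∀ x z, z ∈ g2.getD x [] ↔
          z ∈ g.getD x [] ∨ (x = E ∧ z = P) ∨ (x = P ∧ z = E) := by
        intro x z
        rw [hg2def]
        exact pvG2_mem g E P x z
      have hmono : ∀ x z, z ∈ g.getD x [] → z ∈ g2.getD x [] := by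
        intro x z h
        exact (hadj2 x z).2 (Or.inl h)
      have hconn2 : ∀ x y, x ∈ order2 → y ∈ order2 →
          label2.getD x [] = label2.getD y [] → pvReach g2 x y := by
        intro x y hx hy hxy
        rcases a5 x y hx hy hxy with rfl | ⟨hxo, hyo⟩
        · exact pvReach.refl _
        · rw [a3 x hxo, a3 y hyo] at hxy
          exact pvReach_mono hmono (hl5 x y hxo hyo hxy)
      have hlabel2keys : label2.keys = order2 := a1
      have hgdRel : ∀ x ∈ order2, (pvRelabel label2 le lp).getD x []
          = if label2.getD x [] = lp then le else label2.getD x [] := by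
        intro x hx
        exact pvRelabelX_getD label2 le lp hnd2 x (by rw [hlabel2keys]; exact hx)
      have hgd' : ∀ x ∈ order2, label'.getD x []
          = if le ≠ lp ∧ label2.getD x [] = lp then le else label2.getD x [] := by
        intro x hx
        rw [hlabel']
        by_cases hlelp : le ≠ lp
        · rw [if_pos hlelp, hgdRel x hx]
          by_cases hc : label2.getD x [] = lp
          · rw [if_pos hc, if_pos ⟨hlelp, hc⟩]
          · rw [if_neg hc, if_neg (fun h => hc h.2)]
        · rw [if_neg hlelp, if_neg (fun h => hlelp h.1)]
      have hedgeEP : P ∈ g2.getD E [] := (hadj2 E P).2 (Or.inr (Or.inl ⟨rfl, rfl⟩))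
      have hedgePE : E ∈ g2.getD P [] := (hadj2 P E).2 (Or.inr (Or.inr ⟨rfl, rfl⟩))
      -- new GInv
      have hG' : pvGInv g2 (m.insert (E, P) r) := by
        refine ⟨hg2nd, PySem.Dict.nodup_keys_insert _ _ _ hg2, ?_, ?_, ?_⟩
        · intro it hit
          rcases (PySem.Dict.mem_items_insert m (E, P) r it).1 hit with rfl | ⟨hold, _⟩
          · exact ⟨hE, hP⟩
          · exact hg3 it hold
        · intro k hk
          rcases (PySem.Dict.mem_keys_insert _ _ _ _).1 hk with rfl | hold
          · exact ⟨hord2keys ▸ hEin, hord2keys ▸ hPin⟩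
          · obtain ⟨h1, h2⟩ := hg4 k hold
            exact ⟨hord2keys ▸ hsub _ (hl1 ▸ h1), hord2keys ▸ hsub _ (hl1 ▸ h2)⟩
        · intro x z
          rw [hadj2 x z, hg5 x z]
          constructor
          · rintro ((h | h) | ⟨rfl, rfl⟩ | ⟨rfl, rfl⟩)
            · exact Or.inl ((PySem.Dict.mem_keys_insert _ _ _ _).2 (Or.inr h))
            · exact Or.inr ((PySem.Dict.mem_keys_insert _ _ _ _).2 (Or.inr h))
            · exact Or.inl ((PySem.Dict.mem_keys_insert _ _ _ _).2 (Or.inl rfl))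
            · exact Or.inr ((PySem.Dict.mem_keys_insert _ _ _ _).2 (Or.inl rfl))
          · rintro (h | h)
            · rcases (PySem.Dict.mem_keys_insert _ _ _ _).1 h with heq | hold
              · have h1 : x = E := congrArg Prod.fst heq
                have h2 : z = P := congrArg Prod.snd heq
                exact Or.inr (Or.inl ⟨h1, h2⟩)
              · exact Or.inl (Or.inl hold)
            · rcases (PySem.Dict.mem_keys_insert _ _ _ _).1 h with heq | hold
              · have h1 : z = E := congrArg Prod.fst heq
                have h2 : x = P := congrArg Prod.snd heq
                exact Or.inr (Or.inr ⟨h2, h1⟩)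
              · exact Or.inl (Or.inr hold)
      -- new LInv
      have hL' : pvLInv g2 (m.insert (E, P) r) label' order2
          (edges.setdefault (E, P) (pvFastPair fast E P)) fast := by
        refine ⟨hord2keys, ?_, ?_, ?_, ?_, ?_⟩
        · rw [hlabel']
          by_cases hlelp : le ≠ lp
          · rw [if_pos hlelp, pvRelabelX_keys, hlabel2keys]
          · rw [if_neg hlelp, hlabel2keys]
        · intro n hn
          rw [hgd' n hn]
          by_cases hc : le ≠ lp ∧ label2.getD n [] = lp
          · rw [if_pos hc]
            rw [hle]
            exact hval2 E hEin
          · rw [if_neg hc]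
            exact hval2 n hn
        · intro k hk
          rcases (PySem.Dict.mem_keys_insert _ _ _ _).1 hk with rfl | hold
          · show label'.getD E [] = label'.getD P []
            rw [hgd' E hEin, hgd' P hPin, ← hle, ← hlp]
            by_cases hlelp : le ≠ lp
            · rw [if_neg (show ¬(le ≠ lp ∧ le = lp) from fun h => absurd h.2 h.1),
                if_pos ⟨hlelp, rfl⟩]
            · have heq : le = lp := not_not.1 (by simpa using hlelp)
              rw [if_neg (show ¬(le ≠ lp ∧ le = lp) from fun h => absurd h.2 h.1),
                if_neg (show ¬(le ≠ lp ∧ lp = lp) from fun h => absurd heq h.1)]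
              exact heq
          · obtain ⟨h1, h2⟩ := hg4 k hold
            have h1' : k.1 ∈ order := hl1 ▸ h1
            have h2' : k.2 ∈ order := hl1 ▸ h2
            rw [hgd' k.1 (hsub _ h1'), hgd' k.2 (hsub _ h2'), a3 k.1 h1', a3 k.2 h2',
              hl4 k hold]
        · intro x y hx hy hxy
          rw [hgd' x hx, hgd' y hy] at hxy
          by_cases hlelp : le ≠ lp
          · by_cases hcx : label2.getD x [] = lp <;> by_cases hcy : label2.getD y [] = lp
            · exact hconn2 x y hx hy (hcx.trans hcy.symm)
            · rw [if_pos ⟨hlelp, hcx⟩, if_neg (fun h => hcy h.2)] at hxy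
              have hxP : pvReach g2 x P := hconn2 x P hx hPin (hcx.trans hlp)
              have hPE' : pvReach g2 P E := pvReach.step (pvReach.refl _) hedgePE
              have hEy : pvReach g2 E y := hconn2 E y hEin hy ((hle ▸ hxy : le = label2.getD y []))
              exact pvReach_trans (pvReach_trans hxP hPE') hEy
            · rw [if_neg (fun h => hcx h.2), if_pos ⟨hlelp, hcy⟩] at hxy
              have hyP : pvReach g2 y P := hconn2 y P hy hPin (hcy.trans hlp)
              have hPE' : pvReach g2 P E := pvReach.step (pvReach.refl _) hedgePE
              have hEx : pvReach g2 E x := hconn2 E x hEin hx ((hle ▸ hxy.symm : le = label2.getD x []))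
              have hsymadj : ∀ u v, v ∈ g2.getD u [] → u ∈ g2.getD v [] := by
                intro u v h
                rcases (hadj2 u v).1 h with h' | ⟨rfl, rfl⟩ | ⟨rfl, rfl⟩
                · rcases (hg5 u v).1 h' with hm | hm
                  · exact hmono _ _ ((hg5 v u).2 (Or.inr hm))
                  · exact hmono _ _ ((hg5 v u).2 (Or.inl hm))
                · exact hedgePE
                · exact hedgeEP
              exact pvReach_symm hsymadj (pvReach_trans (pvReach_trans hyP hPE') hEx)
            · rw [if_neg (fun h => hcx h.2), if_neg (fun h => hcy h.2)] at hxy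
              exact hconn2 x y hx hy hxy
          · rw [if_neg (fun h => hlelp h.1), if_neg (fun h => hlelp h.1)] at hxy
            exact hconn2 x y hx hy hxy
        · -- edges items
          have hekeys : edges.keys = m.keys := by
            show edges.items.map (·.1) = m.items.map (·.1)
            rw [hl6, List.map_map]
            rfl
          have hcont : edges.contains (E, P) = m.contains (E, P) := by
            rw [PySem.Dict.contains_eq_decide_mem_keys, PySem.Dict.contains_eq_decide_mem_keys,
              hekeys]
          by_cases hc : m.contains (E, P) = true
          · rw [PySem.Dict.setdefault_of_contains edges _ (hcont.trans hc), hl6,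
              PySem.Dict.items_insert_of_contains m r hc, List.map_map]
            apply List.map_congr_left
            intro p _
            by_cases hp : (p.1 == (E, P)) = true
            · have hpe : p.1 = (E, P) := eq_of_beq hp
              simp [Function.comp, hp, hpe]
            · have hpf : (p.1 == (E, P)) = false := by simpa using hp
              simp [Function.comp, hpf]
          · have hc' : m.contains (E, P) = false := by simpa using hc
            rw [PySem.Dict.setdefault_of_not_contains edges _ (hcont.trans hc'),
              PySem.Dict.items_insert_of_not_contains edges _ (by
                rw [PySem.Dict.contains_eq_decide_mem_keys, hekeys,
                  ← PySem.Dict.contains_eq_decide_mem_keys]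
                exact hc'),
              PySem.Dict.items_insert_of_not_contains m r hc', hl6, List.map_append]
            rfl
      exact ih g2 (m.insert (E, P) r) label' order2
        (edges.setdefault (E, P) (pvFastPair fast E P)) hG' hL'
    · have hA : pvA_buildStep (g, m) r = (g, m) := by
        simp only [pvA_buildStep, if_neg hEP]
      have hB : pvB_buildStep fast (label, order, edges) r = (label, order, edges) := by
        simp only [pvB_buildStep, if_neg hEP]
      rw [hA, hB]
      exact ih g m label order edges ⟨hg1, hg2, hg3, hg4, hg5⟩ ⟨hl1, hl2, hl3, hl4, hl5, hl6⟩

-- DFS from a root collects a fresh, reachable, adjacency-bounded block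
theorem pvDfs_spec (g : PySem.Dict (List String) (PySem.Set (List String))) (root : List String) :
    ∀ (stack : List (List String)) (visited conn : PySem.Set (List String)),
      (∀ x ∈ conn, x ∈ visited) →
      (∀ x ∈ stack, pvReach g root x) →
      ∃ Δ : List (List String),
        pvA_dfs g stack visited conn = (visited ++ Δ, conn ++ Δ) ∧
        Δ.Nodup ∧ (∀ n ∈ Δ, n ∉ visited) ∧ (∀ x ∈ stack, x ∈ visited ++ Δ) ∧
        (∀ y ∈ Δ, pvReach g root y) ∧
        (∀ y ∈ Δ, ∀ z, z ∈ g.getD y [] → z ∈ visited ++ Δ) := by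
  intro stack visited conn
  induction stack, visited, conn using pvA_dfs.induct g with
  | case1 visited conn =>
    intro hsub hr
    exact ⟨[], by simp [pvA_dfs], by simp, by simp, by simp, by simp, by simp⟩
  | case2 current stack visited conn hv ih =>
    intro hsub hr
    obtain ⟨Δ, h1, h2, h3, h4, h5, h6⟩ := ih hsub (fun x hx => hr x (List.mem_cons_of_mem _ hx))
    have hmem : current ∈ visited := (PySem.Set.contains_iff visited current).1 hv
    refine ⟨Δ, ?_, h2, h3, ?_, h5, h6⟩
    · rw [pvA_dfs]; simp only [hv]; simpa using h1
    · intro x hx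
      rcases List.mem_cons.1 hx with rfl | hx'
      · exact List.mem_append.2 (Or.inl hmem)
      · exact h4 x hx'
  | case3 current stack visited conn hv visited'x conn'x ih0 =>
    intro hsub hr
    have e1 : visited'x = PySem.Set.add visited current := rfl
    have e2 : conn'x = PySem.Set.add conn current := rfl
    rw [e1, e2] at ih0
    have hcv : current ∉ visited := fun hm => hv ((PySem.Set.contains_iff visited current).2 hm)
    have hvA : PySem.Set.contains visited current = false := by
      cases h : PySem.Set.contains visited current
      · rfl
      · exact absurd h hv
    have haddv : PySem.Set.add visited current = visited ++ [current] := PySem.Set.add_of_not_mem hcv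
    have hcconn : current ∉ conn := fun hc => hcv (hsub _ hc)
    have haddc : PySem.Set.add conn current = conn ++ [current] := PySem.Set.add_of_not_mem hcconn
    have hrcur : pvReach g root current := hr current (by simp)
    have hsub' : ∀ x ∈ PySem.Set.add conn current, x ∈ PySem.Set.add visited current := by
      intro x hx
      rw [haddc] at hx
      rw [haddv]
      rcases List.mem_append.1 hx with hx' | hx'
      · exact List.mem_append.2 (Or.inl (hsub _ hx'))
      · exact List.mem_append.2 (Or.inr hx')
    have hr' : ∀ x ∈ PySem.Set.diff (g.getD current []) (PySem.Set.add visited current) ++ stack,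
        pvReach g root x := by
      intro x hx
      rcases List.mem_append.1 hx with hx' | hx'
      · have hxadj : x ∈ g.getD current [] := (PySem.Set.mem_diff _ _ _).1 hx' |>.1
        exact pvReach.step hrcur hxadj
      · exact hr x (List.mem_cons_of_mem _ hx')
    obtain ⟨Δ', h1, h2, h3, h4, h5, h6⟩ := ih0 hsub' hr'
    refine ⟨current :: Δ', ?_, ?_, ?_, ?_, ?_, ?_⟩
    · rw [pvA_dfs]
      simp only [hvA, Bool.false_eq_true, dite_false,
        if_neg (fun h : PySem.Set.contains visited current = true => by rw [hvA] at h; cases h)]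
      rw [h1, haddv, haddc]
      simp
    · refine List.nodup_cons.2 ⟨fun hc => ?_, h2⟩
      exact h3 current hc (by rw [haddv]; exact List.mem_append.2 (Or.inr (by simp)))
    · intro n hn
      rcases List.mem_cons.1 hn with rfl | hn'
      · exact hcv
      · intro hnv
        exact h3 n hn' (by rw [haddv]; exact List.mem_append.2 (Or.inl hnv))
    · intro x hx
      rcases List.mem_cons.1 hx with rfl | hx'
      · exact List.mem_append.2 (Or.inr (by simp))
      · have := h4 x (List.mem_append.2 (Or.inr hx'))
        rw [haddv] at this
        simpa [List.append_assoc] using this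
    · intro y hy
      rcases List.mem_cons.1 hy with rfl | hy'
      · exact hrcur
      · exact h5 y hy'
    · intro y hy z hz
      rcases List.mem_cons.1 hy with rfl | hy'
      · by_cases hzv : z ∈ PySem.Set.add visited y
        · rw [haddv] at hzv
          simpa [List.append_assoc] using List.mem_append.2 (Or.inl hzv)
        · have hzs : z ∈ PySem.Set.diff (g.getD y []) (PySem.Set.add visited y) ++ stack :=
            List.mem_append.2 (Or.inl ((PySem.Set.mem_diff _ _ _).2 ⟨hz, hzv⟩))
          have := h4 z hzs
          rw [haddv] at this
          simpa [List.append_assoc] using this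
      · have := h6 y hy' z hz
        rw [haddv] at this
        simpa [List.append_assoc] using this

theorem pvMemTakeFlatten {α : Type} (l : List (List α)) (x : α) (k : Nat) :
    x ∈ (l.take k).flatten ↔ ∃ i, ∃ h : i < l.length, i < k ∧ x ∈ l[i] := by
  rw [List.mem_flatten]
  constructor
  · rintro ⟨s, hs, hx⟩
    obtain ⟨i, hi, rfl⟩ := List.mem_iff_getElem.1 hs
    rw [List.length_take] at hi
    refine ⟨i, by omega, by omega, ?_⟩
    rwa [List.getElem_take] at hx
  · rintro ⟨i, hi, hik, hx⟩
    exact ⟨l[i], List.mem_iff_getElem.2 ⟨i, by simp only [List.length_take]; omega,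
      by rw [List.getElem_take]⟩, hx⟩

theorem pvGetDSet (l : List Bool) (i : Nat) (a : Bool) (j : Nat) (h : i < l.length) :
    (l.set i a).getD j false = if j = i then a else l.getD j false := by
  unfold List.getD
  rw [List.getElem?_set]
  by_cases hj : j = i
  · subst hj; simp [h]
  · simp [hj, Ne.symm hj]

-- distinct blocks of a nodup flatten are disjoint
theorem pvBlocksDisj {α : Type} (Δs : List (List α)) (hnd : Δs.flatten.Nodup)
    {i j : Nat} (hi : i < Δs.length) (hj : j < Δs.length) (hne : i ≠ j)
    {x : α} (hxi : x ∈ Δs[i]) (hxj : x ∈ Δs[j]) : False := by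
  induction Δs generalizing i j with
  | nil => exact absurd hi (by simp)
  | cons a t ih =>
    have hnd' := hnd
    rw [List.flatten_cons, List.nodup_append] at hnd'
    obtain ⟨ha, ht, hdisj⟩ := hnd'
    match i, j with
    | 0, 0 => exact hne rfl
    | 0, j + 1 =>
      have hj' : j < t.length := by simpa using hj
      exact hdisj x (by simpa using hxi)
        x (List.mem_flatten.2 ⟨t[j]'hj', List.getElem_mem hj', by simpa using hxj⟩) rfl
    | i + 1, 0 =>
      have hi' : i < t.length := by simpa using hi
      exact hdisj x (by simpa using hxj)
        x (List.mem_flatten.2 ⟨t[i]'hi', List.getElem_mem hi', by simpa using hxi⟩) rfl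
    | i + 1, j + 1 =>
      exact ih ht (by simpa using hi) (by simpa using hj) (by omega) hxi hxj

-- properties carried by the component list while A's fold runs
def pvProps (g : PySem.Dict (List String) (PySem.Set (List String)))
    (label : PySem.Dict (List String) (List String))
    (Δs : List (List (List String))) (comp_id : PySem.Dict (List String) Int) : Prop :=
  Δs.flatten.Nodup ∧
  (∀ x ∈ Δs.flatten, x ∈ g.keys) ∧
  (∀ j, ∀ hj : j < Δs.length, ∀ y ∈ Δs[j], ∀ z, z ∈ g.getD y [] → z ∈ (Δs.take (j + 1)).flatten) ∧
  (∀ j, ∀ hj : j < Δs.length, ∀ x ∈ Δs[j], comp_id.get? (label.getD x []) = some (j : Int)) ∧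
  (∀ l ∈ comp_id.keys, ∃ j, ∃ hj : j < Δs.length, ∃ x ∈ Δs[j], l = label.getD x [])

-- each block is closed under adjacency
theorem pvBlockClosed (g : PySem.Dict (List String) (PySem.Set (List String)))
    (hsym : ∀ x z, z ∈ g.getD x [] → x ∈ g.getD z [])
    (Δs : List (List (List String))) (hnd : Δs.flatten.Nodup)
    (hcl : ∀ j, ∀ hj : j < Δs.length, ∀ y ∈ Δs[j], ∀ z, z ∈ g.getD y [] → z ∈ (Δs.take (j + 1)).flatten) :
    ∀ j, ∀ hj : j < Δs.length, ∀ y ∈ Δs[j], ∀ z, z ∈ g.getD y [] → z ∈ Δs[j] := by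
  intro j
  induction j using Nat.strong_induction_on with
  | _ j ih =>
    intro hj y hy z hz
    obtain ⟨i, hi, hik, hzi⟩ := (pvMemTakeFlatten Δs z (j + 1)).1 (hcl j hj y hy z hz)
    by_cases hij : i = j
    · subst hij; exact hzi
    · exfalso
      have hyi : y ∈ Δs[i] := ih i (by omega) hi z hzi y (hsym _ _ hz)
      exact pvBlocksDisj Δs hnd hi hj hij hyi hy

-- hence closed under reachability
theorem pvReachClosed (g : PySem.Dict (List String) (PySem.Set (List String)))
    (hsym : ∀ x z, z ∈ g.getD x [] → x ∈ g.getD z [])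
    (Δs : List (List (List String))) (hnd : Δs.flatten.Nodup)
    (hcl : ∀ j, ∀ hj : j < Δs.length, ∀ y ∈ Δs[j], ∀ z, z ∈ g.getD y [] → z ∈ (Δs.take (j + 1)).flatten)
    {j : Nat} (hj : j < Δs.length) {x w : List String} (hx : x ∈ Δs[j])
    (h : pvReach g x w) : w ∈ Δs[j] := by
  induction h with
  | refl => exact hx
  | step _ hadj ih => exact pvBlockClosed g hsym Δs hnd hcl j hj _ ih _ hadj

-- A's reaction list for one component block
def pvReactOf (mapping : PySem.Dict (List String × List String) (List (String × List (String × Int))))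
    (Δ : PySem.Set (List String)) : List (List (String × List (String × Int))) :=
  (mapping.items.filter
      (fun it => PySem.Set.contains Δ it.1.1 || PySem.Set.contains Δ it.1.2)).map (·.2)

-- A's component fold and B's numbering fold, advanced together
theorem pvComp_agree (g : PySem.Dict (List String) (PySem.Set (List String)))
    (mapping : PySem.Dict (List String × List String) (List (String × List (String × Int))))
    (label : PySem.Dict (List String) (List String))
    (hsym : ∀ x z, z ∈ g.getD x [] → x ∈ g.getD z [])
    (hvk : ∀ x z, z ∈ g.getD x [] → z ∈ g.keys)
    (hlR : ∀ a b, pvReach g a b → label.getD a [] = label.getD b [])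
    (hlC : ∀ x y, x ∈ g.keys → y ∈ g.keys → label.getD x [] = label.getD y [] → pvReach g x y) :
    ∀ (ks : List (List String)), (∀ x ∈ ks, x ∈ g.keys) →
    ∀ (Δs : List (List (List String))) (comp_id : PySem.Dict (List String) Int),
      pvProps g label Δs comp_id →
      ∃ Δs' : List (List (List String)), ∃ comp_id' : PySem.Dict (List String) Int,
        ks.foldl (pvA_compStep g mapping) (Δs.flatten, Δs.map (pvReactOf mapping))
          = ((Δs ++ Δs').flatten, (Δs ++ Δs').map (pvReactOf mapping)) ∧
        ks.foldl (pvB_idStep label) (comp_id, List.replicate Δs.length true)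
          = (comp_id', List.replicate (Δs ++ Δs').length true) ∧
        pvProps g label (Δs ++ Δs') comp_id' ∧
        (∀ x ∈ ks, x ∈ (Δs ++ Δs').flatten) := by
  intro ks
  induction ks with
  | nil =>
    intro _ Δs comp_id hprops
    exact ⟨[], comp_id, by simp, by simp, by simpa using hprops, by simp⟩
  | cons node ks ih =>
    intro hks Δs comp_id hprops
    have hnode : node ∈ g.keys := hks node (by simp)
    obtain ⟨hnd, hkg, hcl, hget, hck⟩ := hprops
    by_cases hv : node ∈ Δs.flatten
    · -- node already visited: both folds skip
      obtain ⟨s, hs, hns⟩ := List.mem_flatten.1 hv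
      obtain ⟨j, hj, rfl⟩ := List.mem_iff_getElem.1 hs
      have hA : pvA_compStep g mapping (Δs.flatten, Δs.map (pvReactOf mapping)) node
          = (Δs.flatten, Δs.map (pvReactOf mapping)) := by
        unfold pvA_compStep
        rw [if_pos ((PySem.Set.contains_iff _ _).2 hv)]
      have hB : pvB_idStep label (comp_id, List.replicate Δs.length true) node
          = (comp_id, List.replicate Δs.length true) := by
        unfold pvB_idStep
        rw [if_pos]
        rw [PySem.Dict.contains_eq_isSome_get?, hget j hj node hns]
        rfl
      rw [List.foldl_cons, List.foldl_cons, hA, hB]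
      obtain ⟨Δs', cid', k1, k2, k3, k4⟩ := ih (fun x hx => hks x (List.mem_cons_of_mem _ hx))
        Δs comp_id ⟨hnd, hkg, hcl, hget, hck⟩
      refine ⟨Δs', cid', k1, k2, k3, ?_⟩
      intro x hx
      rcases List.mem_cons.1 hx with rfl | hx'
      · rw [List.flatten_append]
        exact List.mem_append.2 (Or.inl hv)
      · exact k4 x hx'
    · -- new component
      have hfree : comp_id.contains (label.getD node []) = false := by
        cases hc : comp_id.contains (label.getD node []) with
        | false => rfl
        | true =>
          exfalso
          obtain ⟨j, hj, x, hx, hlx⟩ := hck _ ((PySem.Dict.contains_iff_mem_keys _ _).1 hc)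
          have hxk : x ∈ g.keys := hkg x (List.mem_flatten.2 ⟨Δs[j], List.getElem_mem hj, hx⟩)
          have hreach : pvReach g x node := hlC x node hxk hnode hlx.symm
          exact hv (List.mem_flatten.2 ⟨Δs[j], List.getElem_mem hj,
            pvReachClosed g hsym Δs hnd hcl hj hx hreach⟩)
      obtain ⟨Δ, d1, d2, d3, d4, d5, d6⟩ := pvDfs_spec g node [node] Δs.flatten PySem.Set.empty
        (fun x hx => absurd hx (List.not_mem_nil)) (by
          intro x hx
          rcases List.mem_cons.1 hx with rfl | hx'
          · exact pvReach.refl _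
          · exact absurd hx' (List.not_mem_nil))
      have hnodeΔ : node ∈ Δ := by
        rcases List.mem_append.1 (d4 node (by simp)) with h | h
        · exact absurd h hv
        · exact h
      have hΔlab : ∀ x ∈ Δ, label.getD x [] = label.getD node [] := by
        intro x hx
        exact (hlR node x (d5 x hx)).symm
      have hΔkeys : ∀ x ∈ Δ, x ∈ g.keys := by
        intro x hx
        have := d5 x hx
        cases this with
        | refl => exact hnode
        | step _ hadj => exact hvk _ _ hadj
      have hnd1 : (Δs ++ [Δ]).flatten.Nodup := by
        rw [List.flatten_append]
        simp only [List.flatten_cons, List.flatten_nil, List.append_nil]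
        exact List.Nodup.append hnd d2 (fun x hx hx' => d3 x hx' hx)
      have hA : pvA_compStep g mapping (Δs.flatten, Δs.map (pvReactOf mapping)) node
          = ((Δs ++ [Δ]).flatten, (Δs ++ [Δ]).map (pvReactOf mapping)) := by
        unfold pvA_compStep
        rw [if_neg (fun hc => hv ((PySem.Set.contains_iff _ _).1 hc))]
        rw [d1]
        simp [pvReactOf]
      have hB : pvB_idStep label (comp_id, List.replicate Δs.length true) node
          = (comp_id.insert (label.getD node []) (Δs.length : Int),
             List.replicate (Δs ++ [Δ]).length true) := by
        unfold pvB_idStep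
        rw [if_neg (by rw [hfree]; simp)]
        rw [List.length_replicate, List.length_append]
        simp [List.replicate_succ']
      have hget1 : ∀ j, ∀ hj : j < (Δs ++ [Δ]).length, ∀ x ∈ (Δs ++ [Δ])[j],
          (comp_id.insert (label.getD node []) (Δs.length : Int)).get? (label.getD x [])
            = some (j : Int) := by
        intro j hj x hx
        by_cases hjo : j < Δs.length
        · rw [List.getElem_append_left hjo] at hx
          have hne : label.getD x [] ≠ label.getD node [] := by
            intro heq
            have := hget j hjo x hx
            rw [heq] at this
            rw [PySem.Dict.contains_eq_isSome_get?, this] at hfree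
            cases hfree
          rw [PySem.Dict.get?_insert_of_ne comp_id _ hne]
          exact hget j hjo x hx
        · have hje : j = Δs.length := by
            rw [List.length_append] at hj
            simp at hj
            omega
          subst hje
          rw [List.getElem_concat_length rfl] at hx
          rw [hΔlab x hx, PySem.Dict.get?_insert_self]
      have hck1 : ∀ l ∈ (comp_id.insert (label.getD node []) (Δs.length : Int)).keys,
          ∃ j, ∃ hj : j < (Δs ++ [Δ]).length, ∃ x ∈ (Δs ++ [Δ])[j], l = label.getD x [] := by
        intro l hl
        rw [PySem.Dict.keys_insert_of_not_contains comp_id _ hfree] at hl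
        rcases List.mem_append.1 hl with hl' | hl'
        · obtain ⟨j, hj, x, hx, rfl⟩ := hck l hl'
          refine ⟨j, by simp only [List.length_append, List.length_cons, List.length_nil]; omega, x, ?_, rfl⟩
          rw [List.getElem_append_left hj]
          exact hx
        · refine ⟨Δs.length, by simp only [List.length_append, List.length_cons, List.length_nil]; omega, node, ?_, by simpa using hl'⟩
          rw [List.getElem_concat_length rfl]
          exact hnodeΔ
      have hcl1 : ∀ j, ∀ hj : j < (Δs ++ [Δ]).length, ∀ y ∈ (Δs ++ [Δ])[j], ∀ z, z ∈ g.getD y [] →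
          z ∈ ((Δs ++ [Δ]).take (j + 1)).flatten := by
        intro j hj y hy z hz
        by_cases hjo : j < Δs.length
        · rw [List.getElem_append_left hjo] at hy
          have := hcl j hjo y hy z hz
          rw [List.take_append_of_le_length (by omega)]
          exact this
        · have hje : j = Δs.length := by
            rw [List.length_append] at hj
            simp at hj
            omega
          subst hje
          rw [List.getElem_concat_length rfl] at hy
          have := d6 y hy z hz
          rw [List.take_of_length_le (by simp), List.flatten_append]
          simpa using this
      have hkg1 : ∀ x ∈ (Δs ++ [Δ]).flatten, x ∈ g.keys := by
        intro x hx
        rw [List.flatten_append] at hx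
        rcases List.mem_append.1 hx with h | h
        · exact hkg x h
        · exact hΔkeys x (by simpa using h)
      rw [List.foldl_cons, List.foldl_cons, hA, hB]
      obtain ⟨Δs'', cid', k1, k2, k3, k4⟩ := ih (fun x hx => hks x (List.mem_cons_of_mem _ hx))
        (Δs ++ [Δ]) (comp_id.insert (label.getD node []) (Δs.length : Int))
        ⟨hnd1, hkg1, hcl1, hget1, hck1⟩
      refine ⟨[Δ] ++ Δs'', cid', ?_, ?_, ?_, ?_⟩
      · rw [k1]; simp
      · rw [k2]; simp
      · simpa using k3
      · intro x hx
        rcases List.mem_cons.1 hx with rfl | hx'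
        · have hxm : x ∈ ((Δs ++ [Δ]) ++ Δs'').flatten := by
            rw [List.flatten_append, List.flatten_append]
            exact List.mem_append.2 (Or.inl (List.mem_append.2 (Or.inr (by simpa using hnodeΔ))))
          rwa [List.append_assoc] at hxm
        · have := k4 x hx'
          simpa using this

-- the bad-marking fold, position by position
theorem pvMark_spec (label : PySem.Dict (List String) (List String))
    (comp_id : PySem.Dict (List String) Int) :
    ∀ (es : List ((List String × List String) × Bool)) (flags : List Bool),
      (∀ e ∈ es, e.2 = false →
        ∃ jN : Nat, jN < flags.length ∧ comp_id.getD (label.getD e.1.1 []) 0 = (jN : Int)) →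
      (es.foldl (pvB_markStep label comp_id) flags).length = flags.length ∧
      ∀ j : Nat, j < flags.length →
        (es.foldl (pvB_markStep label comp_id) flags).getD j false
          = (flags.getD j false && !(es.any (fun e =>
              !e.2 && (comp_id.getD (label.getD e.1.1 []) 0 == ((j : Nat) : Int))))) := by
  intro es
  induction es with
  | nil => intro flags _; exact ⟨rfl, by intro j _; simp⟩
  | cons e t ih =>
    intro flags h
    by_cases he : e.2 = true
    · have hstep : pvB_markStep label comp_id flags e = flags := by
        simp [pvB_markStep, he]
      rw [List.foldl_cons, hstep]
      obtain ⟨hl, hg⟩ := ih flags (fun e' he' => h e' (List.mem_cons_of_mem _ he'))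
      refine ⟨hl, ?_⟩
      intro j hj
      rw [hg j hj]
      simp [he]
    · have he' : e.2 = false := by simpa using he
      obtain ⟨jN, hjN, hval⟩ := h e (by simp) he'
      have hstep : pvB_markStep label comp_id flags e = flags.set jN false := by
        simp only [pvB_markStep, he', hval]
        rw [if_neg (by simp)]
        unfold PySem.List.pySetD
        rw [PySem.List.pySet?_natCast flags jN false hjN]
        rfl
      rw [List.foldl_cons, hstep]
      obtain ⟨hl, hg⟩ := ih (flags.set jN false) (by
        intro e'' he'' hf
        obtain ⟨k, hk, hv⟩ := h e'' (List.mem_cons_of_mem _ he'') hf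
        exact ⟨k, by simpa using hk, hv⟩)
      rw [List.length_set] at hl
      refine ⟨hl, ?_⟩
      intro j hj
      rw [hg j (by simpa using hj), pvGetDSet flags jN false j hjN]
      by_cases hje : j = jN
      · subst hje
        have : (comp_id.getD (label.getD e.1.1 []) 0 == ((j : Nat) : Int)) = true := by
          simp [hval]
        simp [this, he']
      · have : (comp_id.getD (label.getD e.1.1 []) 0 == ((j : Nat) : Int)) = false := by
          rw [hval]
          simp
          omega
        simp [this, hje, he']


theorem pvInterEmpty (S fs : PySem.Set String) :
    PySem.Set.inter S fs = [] ↔ ∀ x ∈ S, x ∉ fs := by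
  rw [List.eq_nil_iff_forall_not_mem]
  constructor
  · intro h x hx hxf
    exact h x ((PySem.Set.mem_inter S fs x).2 ⟨hx, hxf⟩)
  · intro h x hx
    rcases (PySem.Set.mem_inter S fs x).1 hx with ⟨h1, h2⟩
    exact h x h1 h2

theorem pvFrozenInter (d : List (String × Int)) (fs : PySem.Set String) :
    (PySem.Set.inter (PySem.Set.ofList (PySem.Dict.keys (PySem.Dict.ofList d))) fs = [])
      ↔ (PySem.Set.inter (pvFrozen d) fs = []) := by
  rw [pvInterEmpty, pvInterEmpty]
  unfold pvFrozen
  constructor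
  · intro h x hx
    exact h x ((PySem.Set.mem_ofList _ _).2 ((PySem.List.mem_sorted _ _ _ _).1 hx))
  · intro h x hx
    exact h x ((PySem.List.mem_sorted _ _ _ _).2 ((PySem.Set.mem_ofList _ _).1 hx))

theorem pvFastPair_iff (fs : PySem.Set String) (E P : List String) :
    pvFastPair fs E P = true ↔
      (¬ PySem.Set.inter E fs = [] ∧ ¬ PySem.Set.inter P fs = []) := by
  unfold pvFastPair
  simp

theorem pvAllFastGo_iff (fs : PySem.Set String) :
    ∀ l, pvA_allFastGo fs l = true ↔
      ∀ r ∈ l, ¬ PySem.Set.inter (PySem.Set.ofList (PySem.Dict.keys (PySem.Dict.ofList (pvSide r "educts")))) fs = []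
             ∧ ¬ PySem.Set.inter (PySem.Set.ofList (PySem.Dict.keys (PySem.Dict.ofList (pvSide r "products")))) fs = [] := by
  intro l
  induction l with
  | nil => simp [pvA_allFastGo]
  | cons r t ih =>
    simp only [pvA_allFastGo]
    by_cases hc : PySem.Set.inter (PySem.Set.ofList (PySem.Dict.keys (PySem.Dict.ofList (pvSide r "educts")))) fs = []
        ∨ PySem.Set.inter (PySem.Set.ofList (PySem.Dict.keys (PySem.Dict.ofList (pvSide r "products")))) fs = []
    · rw [if_pos hc]
      constructor
      · intro h; cases h
      · intro h
        exact absurd (h r (by simp)) (by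
          rintro ⟨h1, h2⟩
          rcases hc with hh | hh
          exacts [h1 hh, h2 hh])
    · rw [if_neg hc]
      rw [ih]
      push_neg at hc
      constructor
      · intro h r' hr'
        rcases List.mem_cons.1 hr' with rfl | hr''
        · exact hc
        · exact h r' hr''
      · intro h r' hr'
        exact h r' (List.mem_cons_of_mem _ hr')

theorem pvLhs_iff (fastL : List String)
    (M : PySem.Dict (List String × List String) (List (String × List (String × Int))))
    (hI1 : ∀ it ∈ M.items, it.1.1 = pvFrozen (pvSide it.2 "educts") ∧ it.1.2 = pvFrozen (pvSide it.2 "products"))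
    (Δ : PySem.Set (List String)) :
    pvA_allFast (pvReactOf M Δ) fastL = true ↔
      ∀ it ∈ M.items, (it.1.1 ∈ Δ ∨ it.1.2 ∈ Δ) →
        pvFastPair (PySem.Set.ofList fastL) it.1.1 it.1.2 = true := by
  rw [pvA_allFast, pvAllFastGo_iff]
  constructor
  · intro h it hit hm
    have hr : it.2 ∈ pvReactOf M Δ := by
      unfold pvReactOf
      refine List.mem_map.2 ⟨it, List.mem_filter.2 ⟨hit, ?_⟩, rfl⟩
      rw [Bool.or_eq_true]
      rcases hm with hm | hm
      · exact Or.inl ((PySem.Set.contains_iff Δ it.1.1).2 hm)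
      · exact Or.inr ((PySem.Set.contains_iff Δ it.1.2).2 hm)
    obtain ⟨h1, h2⟩ := h it.2 hr
    rw [pvFastPair_iff]
    obtain ⟨hE, hP⟩ := hI1 it hit
    rw [hE, hP]
    exact ⟨fun hc => h1 ((pvFrozenInter _ _).2 hc), fun hc => h2 ((pvFrozenInter _ _).2 hc)⟩
  · intro h r hr
    unfold pvReactOf at hr
    obtain ⟨it, hfil, rfl⟩ := List.mem_map.1 hr
    obtain ⟨hit, hcond⟩ := List.mem_filter.1 hfil
    rw [Bool.or_eq_true] at hcond
    have hm : it.1.1 ∈ Δ ∨ it.1.2 ∈ Δ := by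
      rcases hcond with h' | h'
      · exact Or.inl ((PySem.Set.contains_iff _ _).1 h')
      · exact Or.inr ((PySem.Set.contains_iff _ _).1 h')
    have hfp := h it hit hm
    rw [pvFastPair_iff] at hfp
    obtain ⟨hE, hP⟩ := hI1 it hit
    rw [hE, hP] at hfp
    exact ⟨fun hc => hfp.1 ((pvFrozenInter _ _).1 hc), fun hc => hfp.2 ((pvFrozenInter _ _).1 hc)⟩

-- ===== VERDICT (by name: the statement is the Claim_ definition above) =====
theorem check_under_crns_for_fast_species_spec : Claim_equal_check_under_crns_for_fast_species := by
  intro reactions fast_species _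
  unfold Spec_check_under_crns_for_fast_species
  simp only [check_under_crns_for_fast_species, check_under_crns_for_fast_species_alt, pvA_build]
  obtain ⟨hG, hL⟩ := pvBuild_inv (PySem.Set.ofList fast_species) reactions
    PySem.Dict.empty PySem.Dict.empty PySem.Dict.empty [] PySem.Dict.empty
    ⟨List.nodup_nil, List.nodup_nil, fun it hit => absurd hit (List.not_mem_nil),
     fun k hk => absurd hk (List.not_mem_nil),
     fun x z => by rw [PySem.Dict.getD_empty]; simp⟩
    ⟨rfl, rfl, fun n hn => absurd hn (List.not_mem_nil),
     fun k hk => absurd hk (List.not_mem_nil),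
     fun x y hx _ _ => absurd hx (List.not_mem_nil), rfl⟩
  set G := (reactions.foldl pvA_buildStep (PySem.Dict.empty, PySem.Dict.empty)).1 with hGdef
  set M := (reactions.foldl pvA_buildStep (PySem.Dict.empty, PySem.Dict.empty)).2 with hMdef
  set st := reactions.foldl (pvB_buildStep (PySem.Set.ofList fast_species))
    (PySem.Dict.empty, [], PySem.Dict.empty) with hstdef
  obtain ⟨hg1, hg2, hg3, hg4, hg5⟩ := hG
  obtain ⟨hl1, hl2, hl3, hl4, hl5, hl6⟩ := hL
  have hsym : ∀ x z, z ∈ G.getD x [] → x ∈ G.getD z [] := by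
    intro x z h
    rcases (hg5 x z).1 h with hm | hm
    · exact (hg5 z x).2 (Or.inr hm)
    · exact (hg5 z x).2 (Or.inl hm)
  have hvk : ∀ x z, z ∈ G.getD x [] → z ∈ G.keys := by
    intro x z h
    rcases (hg5 x z).1 h with hm | hm
    · exact (hg4 _ hm).2
    · exact (hg4 _ hm).1
  have hlR : ∀ a b, pvReach G a b → st.1.getD a [] = st.1.getD b [] := by
    intro a b h
    induction h with
    | refl => rfl
    | step _ hadj ih =>
      rcases (hg5 _ _).1 hadj with hm | hm
      · exact ih.trans (hl4 _ hm)
      · exact ih.trans (hl4 _ hm).symm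
  have hlC : ∀ x y, x ∈ G.keys → y ∈ G.keys →
      st.1.getD x [] = st.1.getD y [] → pvReach G x y := by
    intro x y hx hy h
    exact hl5 x y (hl1.symm ▸ hx) (hl1.symm ▸ hy) h
  obtain ⟨Δs, cid, k1, k2, kprops, kcov⟩ := pvComp_agree G M st.1 hsym hvk hlR hlC G.keys
    (fun x hx => hx) [] PySem.Dict.empty
    ⟨List.nodup_nil, fun x hx => absurd hx (List.not_mem_nil),
     fun j hj => absurd hj (Nat.not_lt_zero j),
     fun j hj => absurd hj (Nat.not_lt_zero j),
     fun l hl => absurd hl (List.not_mem_nil)⟩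
  obtain ⟨hnd, hkg, hcl, hget, hck⟩ := by simpa using kprops
  have kcov' : ∀ x ∈ G.keys, x ∈ Δs.flatten := by simpa using kcov
  have k1' : G.keys.foldl (pvA_compStep G M) (PySem.Set.empty, [])
      = (Δs.flatten, Δs.map (pvReactOf M)) := by simpa using k1
  have k2' : G.keys.foldl (pvB_idStep st.1) (PySem.Dict.empty, [])
      = (cid, List.replicate Δs.length true) := by simpa using k2
  -- the per-item block facts
  have hitem : ∀ it ∈ M.items, ∃ jx : Nat, ∃ hjx : jx < Δs.length,
      it.1.1 ∈ Δs[jx] ∧ it.1.2 ∈ Δs[jx] ∧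
      cid.getD (st.1.getD it.1.1 []) 0 = (jx : Int) := by
    intro it hit
    have hk : it.1 ∈ M.keys := PySem.Dict.mem_keys_of_mem_items M hit
    obtain ⟨h1, h2⟩ := hg4 it.1 hk
    obtain ⟨s1, hs1, hm1⟩ := List.mem_flatten.1 (kcov' _ h1)
    obtain ⟨jx, hjx, rfl⟩ := List.mem_iff_getElem.1 hs1
    obtain ⟨s2, hs2, hm2⟩ := List.mem_flatten.1 (kcov' _ h2)
    obtain ⟨jy, hjy, rfl⟩ := List.mem_iff_getElem.1 hs2
    have hq1 := hget jx hjx it.1.1 hm1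
    have hq2 := hget jy hjy it.1.2 hm2
    have hlab : st.1.getD it.1.1 [] = st.1.getD it.1.2 [] := hl4 it.1 hk
    rw [← hlab] at hq2
    rw [hq1] at hq2
    have hxy : jx = jy := by
      have : (jx : Int) = (jy : Int) := by
        injection hq2
      exact_mod_cast this
    subst hxy
    refine ⟨jx, hjx, hm1, hm2, ?_⟩
    rw [PySem.Dict.getD_eq_get?_getD, hq1]
    rfl
  -- the boolean agreement at index j
  have hbool : ∀ j, ∀ hj : j < Δs.length,
      pvA_allFast (pvReactOf M Δs[j]) fast_species
        = !((M.items.map (fun it => (it.1, pvFastPair (PySem.Set.ofList fast_species) it.1.1 it.1.2))).any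
            (fun e => !e.2 && (cid.getD (st.1.getD e.1.1 []) 0 == ((j : Nat) : Int)))) := by
    intro j hj
    rw [Bool.eq_iff_iff]
    rw [pvLhs_iff fast_species M hg3 Δs[j]]
    rw [Bool.not_eq_eq_eq_not, Bool.not_true, List.any_eq_false]
    constructor
    · intro hall e he
      obtain ⟨it, hit, rfl⟩ := List.mem_map.1 he
      obtain ⟨jx, hjx, hx1, hx2, hcd⟩ := hitem it hit
      by_cases hfp : pvFastPair (PySem.Set.ofList fast_species) it.1.1 it.1.2 = true
      · simp [hfp]
      · intro hc
        rw [Bool.and_eq_true] at hc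
        have hji : (jx : Int) = (j : Int) := by
          have := hc.2
          rw [hcd] at this
          exact eq_of_beq this
        have hjx_j : jx = j := by exact_mod_cast hji
        subst hjx_j
        exact hfp (hall it hit (Or.inl hx1))
    · intro hnone it hit hm
      obtain ⟨jx, hjx, hx1, hx2, hcd⟩ := hitem it hit
      have hjeq : jx = j := by
        rcases hm with hm | hm
        · by_contra hne
          exact pvBlocksDisj Δs hnd hjx hj hne hx1 hm
        · by_contra hne
          exact pvBlocksDisj Δs hnd hjx hj hne hx2 hm
      subst hjeq
      have := hnone (it.1, pvFastPair (PySem.Set.ofList fast_species) it.1.1 it.1.2)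
        (List.mem_map.2 ⟨it, hit, rfl⟩)
      cases hfp : pvFastPair (PySem.Set.ofList fast_species) it.1.1 it.1.2 with
      | true => rfl
      | false =>
        exfalso
        apply this
        rw [Bool.and_eq_true]
        exact ⟨by rw [hfp]; rfl, by rw [hcd]; simp⟩
  by_cases hempty : G.items = []
  · rw [if_pos hempty]
    have hkeys : G.keys = [] := by
      show G.items.map (·.1) = []
      rw [hempty]
      rfl
    have hMkeys : M.keys = [] := by
      by_contra hne
      obtain ⟨k, hk⟩ := List.exists_mem_of_ne_nil _ hne
      exact absurd ((hg4 k hk).1) (by rw [hkeys]; exact List.not_mem_nil)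
    have hMitems : M.items = [] := by
      have : M.items.map (·.1) = [] := hMkeys
      exact List.map_eq_nil_iff.1 this
    have horder : st.2.1 = [] := by rw [hl1, hkeys]
    have hedges : st.2.2.items = [] := by rw [hl6, hMitems]; rfl
    rw [horder, hedges]
    rfl
  · rw [if_neg hempty]
    rw [k1', hl1, k2', hl6]
    obtain ⟨hmlen, hmget⟩ := pvMark_spec st.1 cid
      (M.items.map (fun it => (it.1, pvFastPair (PySem.Set.ofList fast_species) it.1.1 it.1.2)))
      (List.replicate Δs.length true)
      (by
        intro e he _
        obtain ⟨it, hit, rfl⟩ := List.mem_map.1 he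
        obtain ⟨jx, hjx, _, _, hcd⟩ := hitem it hit
        exact ⟨jx, by rw [List.length_replicate]; exact hjx, hcd⟩)
    rw [List.length_replicate] at hmlen hmget
    apply List.ext_getElem
    · simp [PySem.List.length_enumerate, hmlen]
    · intro j h1 h2
      simp only [List.getElem_map, PySem.List.getElem_enumerate]
      have hjlen : j < Δs.length := by
        simp [PySem.List.length_enumerate] at h1
        exact h1
      refine Prod.ext (by simp) ?_
      simp only [List.getElem_map]
      have hjf : j < (List.foldl (pvB_markStep st.1 cid)
          (List.replicate Δs.length true)
          (M.items.map (fun it => (it.1, pvFastPair (PySem.Set.ofList fast_species) it.1.1 it.1.2)))).length := by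
        rw [hmlen]; exact hjlen
      rw [show (List.foldl (pvB_markStep st.1 cid) (List.replicate Δs.length true)
            (M.items.map (fun it => (it.1, pvFastPair (PySem.Set.ofList fast_species) it.1.1 it.1.2))))[j]'hjf
          = (List.foldl (pvB_markStep st.1 cid) (List.replicate Δs.length true)
            (M.items.map (fun it => (it.1, pvFastPair (PySem.Set.ofList fast_species) it.1.1 it.1.2)))).getD j false
        from (List.getD_eq_getElem _ false hjf).symm]
      rw [hmget j hjlen]
      have hrep : (List.replicate Δs.length true).getD j false = true := by
        rw [List.getD_eq_getElem _ false (by rw [List.length_replicate]; exact hjlen)]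
        simp
      rw [hrep, Bool.true_and]
      exact hbool j hjlen
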